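-- pv_equiv track=rewrite | github.com/Volshebnik23/AICP | conformance/runner/aicp_conformance_runner.py | _has_resolvable_evidence_ref
-- ===== SOURCE A (Python) =====
-- from typing import Any
--
-- def _has_resolvable_evidence_ref(evidence_refs: Any, prior_message_ids: set[str], prior_message_hashes: set[str], prior_payload_object_hashes: set[str]) -> bool:
--     if not isinstance(evidence_refs, list):
--         return False
--     for ref in evidence_refs:
--         if not isinstance(ref, str) or not ref:
--             continue
--         if ref.startswith("msgid:") and ref[len("msgid:"):] in prior_message_ids:
--             return True
--         if ref.startswith("msghash:") and ref[len("msghash:"):] in prior_message_hashes: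
--             return True
--         if ref.startswith("objhash:") and ref[len("objhash:"):] in prior_payload_object_hashes:
--             return True
--     return False
-- ===== SOURCE B (Python) =====
-- def _has_resolvable_evidence_ref(evidence_refs, prior_message_ids, prior_message_hashes, prior_payload_object_hashes):
--     if not isinstance(evidence_refs, list):
--         return False
--     resolvable = (
--         {"msgid:" + i for i in prior_message_ids}
--         | {"msghash:" + h for h in prior_message_hashes}
--         | {"objhash:" + o for o in prior_payload_object_hashes}
--     )
--     return any(isinstance(ref, str) and ref in resolvable for ref in evidence_refs)
-- ===== Notes on version B (the rewrite author's own statement) =====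
-- stated objective: alternative
-- what changed: Instead of parsing each evidence ref (startswith + prefix-stripping against three sets), B precomputes the full set of resolvable ref strings ('msgid:'+id, 'msghash:'+h, 'objhash:'+o) from the priors and reduces the whole check to plain set membership of each ref.
import Mathlib
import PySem

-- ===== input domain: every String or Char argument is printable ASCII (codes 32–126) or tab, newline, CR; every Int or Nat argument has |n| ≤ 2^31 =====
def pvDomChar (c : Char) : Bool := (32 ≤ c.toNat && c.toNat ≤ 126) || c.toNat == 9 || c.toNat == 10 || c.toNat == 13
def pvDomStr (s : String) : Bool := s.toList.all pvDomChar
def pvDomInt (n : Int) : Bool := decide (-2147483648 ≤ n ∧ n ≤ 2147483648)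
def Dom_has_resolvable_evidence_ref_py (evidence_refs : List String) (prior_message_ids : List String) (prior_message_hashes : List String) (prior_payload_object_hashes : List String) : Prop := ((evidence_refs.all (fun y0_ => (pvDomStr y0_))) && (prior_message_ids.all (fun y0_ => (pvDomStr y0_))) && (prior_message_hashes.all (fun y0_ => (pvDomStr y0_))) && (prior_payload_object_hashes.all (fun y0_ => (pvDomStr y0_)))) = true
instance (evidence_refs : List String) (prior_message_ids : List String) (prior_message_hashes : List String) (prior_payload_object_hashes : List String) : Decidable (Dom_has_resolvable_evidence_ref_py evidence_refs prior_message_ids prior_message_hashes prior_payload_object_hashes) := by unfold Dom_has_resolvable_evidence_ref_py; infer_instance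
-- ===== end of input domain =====

-- B precomputes the set of ALL resolvable ref strings ("msgid:"+id, "msghash:"+h, "objhash:"+o)
-- from the priors, so the check is a plain set-membership test per ref (objective: alternative).

-- ===== PORT A =====
-- loop over evidence_refs: skip empty refs, test the three prefixes in order
def pvLoopA (ids hs os : List String) : List String → Bool
  | [] => false
  | ref :: rest =>
    if ref = "" then pvLoopA ids hs os rest
    else if PySem.Str.startswith ref "msgid:" && ids.contains (PySem.Str.slice ref (some (6 : Int)) none) then true
    else if PySem.Str.startswith ref "msghash:" && hs.contains (PySem.Str.slice ref (some (8 : Int)) none) then true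
    else if PySem.Str.startswith ref "objhash:" && os.contains (PySem.Str.slice ref (some (8 : Int)) none) then true
    else pvLoopA ids hs os rest

def has_resolvable_evidence_ref_py (evidence_refs : List String) (prior_message_ids : List String) (prior_message_hashes : List String) (prior_payload_object_hashes : List String) : Bool :=
  pvLoopA prior_message_ids prior_message_hashes prior_payload_object_hashes evidence_refs

-- ===== PORT B =====
-- {"msgid:"+i for i in ids} | {"msghash:"+h for h in hs} | {"objhash:"+o for o in os}
def pvResolvable (ids hs os : List String) : PySem.Set String :=
  PySem.Set.union
    (PySem.Set.union (PySem.Set.ofList (ids.map (fun i => "msgid:" ++ i)))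
      (PySem.Set.ofList (hs.map (fun h => "msghash:" ++ h))))
    (PySem.Set.ofList (os.map (fun o => "objhash:" ++ o)))

-- any(ref in resolvable for ref in evidence_refs)
def has_resolvable_evidence_ref_py_alt (evidence_refs : List String) (prior_message_ids : List String) (prior_message_hashes : List String) (prior_payload_object_hashes : List String) : Bool :=
  evidence_refs.any (fun ref =>
    PySem.Set.contains (pvResolvable prior_message_ids prior_message_hashes prior_payload_object_hashes) ref)

-- ===== PRECONDITION & SPEC =====
def Spec_has_resolvable_evidence_ref_py (evidence_refs : List String) (prior_message_ids : List String) (prior_message_hashes : List String) (prior_payload_object_hashes : List String) (out : Bool) : Prop := out = has_resolvable_evidence_ref_py_alt evidence_refs prior_message_ids prior_message_hashes prior_payload_object_hashes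
instance (evidence_refs : List String) (prior_message_ids : List String) (prior_message_hashes : List String) (prior_payload_object_hashes : List String) (out : Bool) : Decidable (Spec_has_resolvable_evidence_ref_py evidence_refs prior_message_ids prior_message_hashes prior_payload_object_hashes out) := by unfold Spec_has_resolvable_evidence_ref_py; infer_instance

-- ===== CLAIM (what is proved, stated in full; the proofs are below) =====
def Claim_equal_has_resolvable_evidence_ref_py : Prop := ∀ (evidence_refs : List String) (prior_message_ids : List String) (prior_message_hashes : List String) (prior_payload_object_hashes : List String), Dom_has_resolvable_evidence_ref_py evidence_refs prior_message_ids prior_message_hashes prior_payload_object_hashes → Spec_has_resolvable_evidence_ref_py evidence_refs prior_message_ids prior_message_hashes prior_payload_object_hashes (has_resolvable_evidence_ref_py evidence_refs prior_message_ids prior_message_hashes prior_payload_object_hashes)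

-- ===== LEMMAS AND PROOFS =====

-- one startswith branch of A ↔ "∃ x in the list with ref = prefix ++ x"
lemma pv_branch (xs : List String) (pre ref : String) (n : Int) (hn : n.toNat = pre.toList.length) (h0 : 0 ≤ n) :
    (PySem.Str.startswith ref pre && xs.contains (PySem.Str.slice ref (some n) none))
      = decide (∃ x ∈ xs, ref = pre ++ x) := by
  by_cases hsw : PySem.Str.startswith ref pre = true
  · obtain ⟨t, ht⟩ : pre.toList <+: ref.toList := by
      simpa [PySem.Str.startswith_eq, PySem.Chars.startswith, List.isPrefixOf_iff_prefix] using hsw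
    have hslice : PySem.Str.slice ref (some n) none = String.ofList t := by
      apply String.toList_inj.1
      rw [PySem.Str.toList_slice, PySem.Chars.slice_eq_listSlice, PySem.List.slice_from ref.toList h0,
        hn, ← ht]
      simp
    rw [hsw, hslice]
    simp only [Bool.true_and, List.contains_eq_mem, decide_eq_decide]
    constructor
    · intro hmem
      exact ⟨String.ofList t, hmem, String.toList_inj.1 (by simp [← ht])⟩
    · rintro ⟨x, hx, rfl⟩
      have : x = String.ofList t := String.toList_inj.1 (by
        have := ht
        simp only [String.toList_append] at this
        have := List.append_cancel_left this
        simp [this])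
      exact this ▸ hx
  · rw [Bool.not_eq_true] at hsw
    rw [hsw]
    symm
    simp only [Bool.false_and, decide_eq_false_iff_not]
    rintro ⟨x, _, rfl⟩
    rw [PySem.Str.startswith_eq, PySem.Chars.startswith, Bool.eq_false_iff] at hsw
    exact hsw (by simp [List.isPrefixOf_iff_prefix, String.toList_append])

-- membership in B's precomputed set, as the three existential disjuncts
lemma pv_mem_resolvable (ids hs os : List String) (ref : String) :
    PySem.Set.contains (pvResolvable ids hs os) ref
      = (decide (∃ x ∈ ids, ref = "msgid:" ++ x) || decide (∃ x ∈ hs, ref = "msghash:" ++ x)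
         || decide (∃ x ∈ os, ref = "objhash:" ++ x)) := by
  rw [Bool.eq_iff_iff]
  simp only [PySem.Set.contains_iff, pvResolvable, PySem.Set.mem_union, PySem.Set.mem_ofList,
    List.mem_map, Bool.or_eq_true, decide_eq_true_eq]
  constructor
  · rintro ((⟨x, hx, rfl⟩ | ⟨x, hx, rfl⟩) | ⟨x, hx, rfl⟩)
    · exact Or.inl (Or.inl ⟨x, hx, rfl⟩)
    · exact Or.inl (Or.inr ⟨x, hx, rfl⟩)
    · exact Or.inr ⟨x, hx, rfl⟩
  · rintro ((⟨x, hx, rfl⟩ | ⟨x, hx, rfl⟩) | ⟨x, hx, rfl⟩)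
    · exact Or.inl (Or.inl ⟨x, hx, rfl⟩)
    · exact Or.inl (Or.inr ⟨x, hx, rfl⟩)
    · exact Or.inr ⟨x, hx, rfl⟩

-- a string starting with a nonempty prefix is not ""
lemma pv_ne_empty (pre x : String) (hpre : pre.toList ≠ []) : pre ++ x ≠ "" := by
  intro h
  have := congrArg String.toList h
  simp only [String.toList_append] at this
  exact hpre (List.eq_nil_of_append_eq_nil this).1

-- per-ref: A's skip-empty three-branch test equals B's set membership
lemma pv_step (ids hs os : List String) (ref : String) :
    (if ref = "" then false
     else (PySem.Str.startswith ref "msgid:" && ids.contains (PySem.Str.slice ref (some (6 : Int)) none)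
        || PySem.Str.startswith ref "msghash:" && hs.contains (PySem.Str.slice ref (some (8 : Int)) none)
        || PySem.Str.startswith ref "objhash:" && os.contains (PySem.Str.slice ref (some (8 : Int)) none)))
      = PySem.Set.contains (pvResolvable ids hs os) ref := by
  rw [pv_mem_resolvable,
    pv_branch ids "msgid:" ref 6 (by decide) (by norm_num),
    pv_branch hs "msghash:" ref 8 (by decide) (by norm_num),
    pv_branch os "objhash:" ref 8 (by decide) (by norm_num)]
  by_cases h : ref = ""
  · subst h
    rw [if_pos rfl]
    symm
    simp only [Bool.or_eq_false_iff, decide_eq_false_iff_not]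
    refine ⟨⟨?_, ?_⟩, ?_⟩ <;> rintro ⟨x, _, hx⟩ <;> exact pv_ne_empty _ x (by decide) hx.symm
  · rw [if_neg h]

-- A's early-return loop is List.any of its per-ref test
lemma pv_loopA_any (ids hs os : List String) : ∀ refs : List String,
    pvLoopA ids hs os refs
      = refs.any (fun ref =>
          if ref = "" then false
          else (PySem.Str.startswith ref "msgid:" && ids.contains (PySem.Str.slice ref (some (6 : Int)) none)
             || PySem.Str.startswith ref "msghash:" && hs.contains (PySem.Str.slice ref (some (8 : Int)) none)
             || PySem.Str.startswith ref "objhash:" && os.contains (PySem.Str.slice ref (some (8 : Int)) none))) := by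
  intro refs
  induction refs with
  | nil => rfl
  | cons ref rest ih =>
    rw [List.any_cons, ← ih, pvLoopA]
    by_cases h : ref = ""
    · simp [h]
    · rw [if_neg h, if_neg h]
      cases h1 : PySem.Str.startswith ref "msgid:" && ids.contains (PySem.Str.slice ref (some (6 : Int)) none) <;>
      cases h2 : PySem.Str.startswith ref "msghash:" && hs.contains (PySem.Str.slice ref (some (8 : Int)) none) <;>
      cases h3 : PySem.Str.startswith ref "objhash:" && os.contains (PySem.Str.slice ref (some (8 : Int)) none) <;>
      simp

-- ===== VERDICT (by name: the statement is the Claim_ definition above) =====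
theorem has_resolvable_evidence_ref_py_spec : Claim_equal_has_resolvable_evidence_ref_py := by
  intro e ids hs os _
  unfold Spec_has_resolvable_evidence_ref_py has_resolvable_evidence_ref_py has_resolvable_evidence_ref_py_alt
  rw [pv_loopA_any]
  congr 1
  funext ref
  exact pv_step ids hs os ref
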